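-- pv_equiv track=rewrite | github.com/dudamarlena/pyc_source | pycfiles/PyKMIP-0.10.0.tar/basics.py | kmers
-- ===== SOURCE A (Python) =====
-- _nuc = {'A': 0, 'a': 0, 'C': 1, 'c': 1, 'G': 2, 'g': 2, 'T': 3, 't': 3, 'U': 3, 'u': 3}
--
-- def kmers(k, seq, bothStrands=False):
--     """
--     A generator for extracting *k*-mers from a string nucleotide
--     sequence `seq`.  The parameter `bothStrands` determines whether
--     the sequence of result *k*-mers should include the reverse
--     complement of each *k*-mer extracted from the string.
--
--     The *k*-mers are extracted using a *sliding* window, not a *tiling*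
--     window.  This means that the results include the *k*-mer starting
--     at each position in the string: 0, 1, 2, ...., len(str) - k + 1.
--
--     Any *k*-mers overlaying characters *other* than AaCcGgTtUu are skipped.
--
--     Values of `k` > 30 are not guaranteed to work.
--     """
--     z = len(seq)
--     msk = (1 << 2 * k) - 1
--     s = 2 * (k - 1)
--     i = 0
--     j = 0
--     x = 0
--     xb = 0
--     while i + k <= z:
--         while i + j < z and j < k:
--             b = _nuc.get(seq[(i + j)], 4)
--             if b == 4:
--                 i += j + 1
--                 j = 0
--                 x = 0
--                 xb = 0
--             else:
--                 x = x << 2 | b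
--                 xb = xb >> 2 | 3 - b << s
--                 j += 1
--
--         if j == k:
--             x &= msk
--             yield x
--             if bothStrands:
--                 yield xb
--             j -= 1
--         i += 1
-- ===== SOURCE B (Python) =====
-- _nuc = {'A': 0, 'a': 0, 'C': 1, 'c': 1, 'G': 2, 'g': 2, 'T': 3, 't': 3, 'U': 3, 'u': 3}
--
-- def kmers(k, seq, bothStrands=False):
--     # Per-window recompute: each k-window is encoded from scratch (no rolling state).
--     n = len(seq)
--     for i in range(n - k + 1):
--         bs = [_nuc.get(c, 4) for c in seq[i:i + k]]
--         if 4 in bs: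
--             continue
--         x = 0
--         for b in bs:
--             x = x * 4 + b
--         yield x
--         if bothStrands:
--             xb = 0
--             for b in reversed(bs):
--                 xb = xb * 4 + (3 - b)
--             yield xb
-- ===== Notes on version B (the rewrite author's own statement) =====
-- stated objective: simpler
-- what changed: Replaces A's rolling sliding-window state machine (two bit-twiddled registers x/xb maintained incrementally across windows, with mask, shift constant and reset-and-resync logic on invalid characters) by a plain per-window loop that re-encodes each k-window from scratch and skips any window containing an invalid base.
import Mathlib
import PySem

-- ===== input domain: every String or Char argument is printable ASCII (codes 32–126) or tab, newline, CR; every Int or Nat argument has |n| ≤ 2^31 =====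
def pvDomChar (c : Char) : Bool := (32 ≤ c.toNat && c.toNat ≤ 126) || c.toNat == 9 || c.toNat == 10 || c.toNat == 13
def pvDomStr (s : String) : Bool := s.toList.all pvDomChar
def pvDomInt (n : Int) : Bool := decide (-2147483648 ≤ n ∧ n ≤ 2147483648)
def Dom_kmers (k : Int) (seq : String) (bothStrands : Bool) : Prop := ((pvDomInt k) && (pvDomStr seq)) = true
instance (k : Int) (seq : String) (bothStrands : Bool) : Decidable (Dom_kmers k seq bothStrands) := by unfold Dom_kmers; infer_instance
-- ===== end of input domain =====

-- B replaces A's rolling two-register bit-twiddling state machine by a plain per-window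
-- re-encoding loop (objective: simpler; not faster — O(n·k) vs A's O(n)).

-- ===== PORT A =====
-- _nuc.get(c, 4)
def nuc (c : Char) : Nat :=
  if c = 'A' ∨ c = 'a' then 0
  else if c = 'C' ∨ c = 'c' then 1
  else if c = 'G' ∨ c = 'g' then 2
  else if c = 'T' ∨ c = 't' ∨ c = 'U' ∨ c = 'u' then 3
  else 4

-- A's inner while loop; returns the final (i, j, x, xb).  x and xb are Nat: in A they are
-- built only from nonnegative shifts/ors of 0, so Nat <<< >>> ||| match Python exactly.
-- seq[i+j] is ported as pyGet?; the loop guard keeps 0 ≤ i + j < len in every reachable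
-- state, so the .getD 'N' default (an invalid base) is never consulted.
def kmersInner (cs : List Char) (kN sN : Nat) (i j : Int) (x xb : Nat) : Int × Int × Nat × Nat :=
  if h : i + j < (cs.length : Int) ∧ j < (kN : Int) then
    let b := nuc ((PySem.List.pyGet? cs (i + j)).getD 'N')
    if b = 4 then
      kmersInner cs kN sN (i + j + 1) 0 0 0
    else
      kmersInner cs kN sN i (j + 1) (x <<< 2 ||| b) (xb >>> 2 ||| (3 - b) <<< sN)
  else (i, j, x, xb)
termination_by ((cs.length : Int) - (i + j)).toNat
decreasing_by all_goals omega

-- A's outer while loop.  `fuel` is a pure totality guard (the number of remaining outer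
-- iterations; i strictly increases each iteration, so the initial fuel len+2 is never
-- exhausted on a real run).
def kmersOuter (cs : List Char) (kN sN msk : Nat) (bS : Bool) :
    Nat → Int → Int → Nat → Nat → List Int → List Int
  | 0, _, _, _, _, acc => acc
  | fuel + 1, i, j, x, xb, acc =>
    if i + (kN : Int) ≤ (cs.length : Int) then
      match kmersInner cs kN sN i j x xb with
      | (i', j', x', xb') =>
        if j' = (kN : Int) then
          kmersOuter cs kN sN msk bS fuel (i' + 1) (j' - 1) (x' &&& msk) xb'
            (acc ++ [((x' &&& msk : Nat) : Int)] ++ (if bS then [((xb' : Nat) : Int)] else []))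
        else
          kmersOuter cs kN sN msk bS fuel (i' + 1) j' x' xb' acc
    else acc

-- Pre_ gives 0 ≤ k (for k < 0 Python raises ValueError at `msk`), so k.toNat is exact;
-- s = 2*(k-1) is -2 in Python only when k = 0, where A never evaluates the shift by s
-- on any input Pre_ admits, so the Nat truncation 2*(kN-1) is never consulted either.
def kmers (k : Int) (seq : String) (bothStrands : Bool) : List Int :=
  let cs := seq.toList
  let kN := k.toNat
  kmersOuter cs kN (2 * (kN - 1)) ((1 <<< (2 * kN)) - 1) bothStrands (cs.length + 2) 0 0 0 0 []

-- ===== PORT B =====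
def kmers_alt (k : Int) (seq : String) (bothStrands : Bool) : List Int :=
  let cs := seq.toList
  (PySem.List.pyRange 0 ((cs.length : Int) - k + 1) 1).foldl
    (fun acc i =>
      let bs := (PySem.List.slice cs (some i) (some (i + k))).map (fun c => (nuc c : Int))
      if (4 : Int) ∈ bs then acc
      else
        acc ++ [bs.foldl (fun a b => a * 4 + b) 0]
          ++ (if bothStrands then [bs.reverse.foldl (fun a b => a * 4 + (3 - b)) 0] else []))
    []

-- ===== PRECONDITION & SPEC =====
-- Pre_ excludes exactly the inputs where A raises ValueError('negative shift count'):
-- every k < 0 (at msk = (1 << 2*k) - 1), and k = 0 whenever the sequence contains a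
-- nucleotide character (the j = -1 rescanning path then shifts by s = -2); k = 0 on
-- nucleotide-free sequences, where A returns, stays inside Pre_.
def Pre_kmers (k : Int) (seq : String) (bothStrands : Bool) : Prop :=
  1 ≤ k ∨ (k = 0 ∧ seq.toList.all (fun c => nuc c == 4) = true)
instance (k : Int) (seq : String) (bothStrands : Bool) : Decidable (Pre_kmers k seq bothStrands) := by unfold Pre_kmers; infer_instance
def pvWitness_kmers : Int × String × Bool := (2, "ACGT", true)

def Spec_kmers (k : Int) (seq : String) (bothStrands : Bool) (out : List Int) : Prop := out = kmers_alt k seq bothStrands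
instance (k : Int) (seq : String) (bothStrands : Bool) (out : List Int) : Decidable (Spec_kmers k seq bothStrands out) := by unfold Spec_kmers; infer_instance

-- ===== CLAIM (what is proved, stated in full; the proofs are below) =====
def Claim_equal_kmers : Prop := ∀ (k : Int) (seq : String) (bothStrands : Bool), Dom_kmers k seq bothStrands → Pre_kmers k seq bothStrands → Spec_kmers k seq bothStrands (kmers k seq bothStrands)

-- ===== LEMMAS AND PROOFS =====

-- forward integer encoding of a list of base codes (first base most significant)
def F (w : List Nat) : Nat := w.foldl (fun a b => a * 4 + b) 0
-- reverse-complement encoding: Σ (3 - b_j) * 4^j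
def RC (w : List Nat) : Nat := w.reverse.foldl (fun a b => a * 4 + (3 - b)) 0
-- the window of base codes of length kN starting at i
def win (cs : List Char) (i kN : Nat) : List Nat := ((cs.drop i).take kN).map nuc

-- reference: the outputs contributed by windows starting at positions ≥ i
def refFrom (cs : List Char) (kN : Nat) (bS : Bool) (i : Nat) : List Int :=
  if _h : i + kN ≤ cs.length then
    (if 4 ∈ win cs i kN then []
     else [(F (win cs i kN) : Int)] ++ (if bS then [(RC (win cs i kN) : Int)] else []))
      ++ refFrom cs kN bS (i + 1)
  else []
termination_by cs.length + 1 - i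

theorem lor_disjoint (m : Nat) : ∀ a c : Nat, a < 2 ^ m → a ||| (c <<< m) = a + c * 2 ^ m := by
  induction m with
  | zero => intro a c h; interval_cases a; simp [Nat.shiftLeft_eq]
  | succ m ih =>
    intro a c h
    have hd : Nat.bit (a.testBit 0) (a >>> 1) = a := Nat.bit_testBit_zero_shiftRight_one a
    have hsh : c <<< (m + 1) = Nat.bit false (c <<< m) := by
      simp [Nat.bit, Nat.shiftLeft_succ_inside, Nat.shiftLeft_eq]; ring
    calc a ||| (c <<< (m + 1))
        = Nat.bit (a.testBit 0) (a >>> 1) ||| Nat.bit false (c <<< m) := by rw [hd, hsh]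
      _ = Nat.bit (a.testBit 0 || false) ((a >>> 1) ||| (c <<< m)) := Nat.lor_bit _ _ _ _
      _ = Nat.bit (a.testBit 0) ((a >>> 1) + c * 2 ^ m) := by
            rw [Bool.or_false, ih (a >>> 1) c (by simp [Nat.shiftRight_one]; omega)]
      _ = a + c * 2 ^ (m + 1) := by
            have h2 := hd
            cases hb : a.testBit 0 <;>
              simp [Nat.bit, hb, Nat.shiftRight_one] at h2 ⊢ <;> ring_nf <;> omega

theorem nuc_le (c : Char) : nuc c ≤ 4 := by
  unfold nuc; split_ifs <;> omega

-- loop invariant of A relating the registers to the current partial window of A relating the registers to the current partial window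
def AInv (cs : List Char) (kN iN jN : Nat) (x xb : Nat) : Prop :=
  jN ≤ kN ∧ iN + jN ≤ cs.length ∧ 4 ∉ win cs iN jN ∧
  x % 4 ^ jN = F (win cs iN jN) ∧ xb < 4 ^ kN ∧ xb / 4 ^ (kN - jN) = RC (win cs iN jN)

theorem F_append (w : List Nat) (b : Nat) : F (w ++ [b]) = F w * 4 + b := by
  simp [F]

theorem foldl_lin (w : List Nat) : ∀ a : Nat,
    w.foldl (fun a b => a * 4 + (3 - b)) a
      = a * 4 ^ w.length + w.foldl (fun a b => a * 4 + (3 - b)) 0 := by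
  induction w with
  | nil => simp
  | cons b w ih =>
    intro a
    simp only [List.foldl_cons, List.length_cons]
    rw [ih (a * 4 + (3 - b)), ih (0 * 4 + (3 - b))]
    simp [pow_succ]; ring

theorem RC_append (w : List Nat) (b : Nat) : RC (w ++ [b]) = RC w + (3 - b) * 4 ^ w.length := by
  simp only [RC, List.reverse_append, List.reverse_cons, List.reverse_nil, List.nil_append,
    List.singleton_append, List.foldl_cons]
  rw [foldl_lin]
  simp only [RC, List.length_reverse, Nat.zero_mul, Nat.zero_add]
  ring

theorem RC_cons (b : Nat) (w : List Nat) : RC (b :: w) = RC w * 4 + (3 - b) := by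
  simp [RC, List.foldl_append]

theorem F_lt (w : List Nat) (h : ∀ b ∈ w, b < 4) : F w < 4 ^ w.length := by
  induction w using List.reverseRecOn with
  | nil => simp [F]
  | append_singleton w b ih =>
    have hb : b < 4 := h b (by simp)
    have hw : F w < 4 ^ w.length := ih (fun x hx => h x (by simp [hx]))
    simp only [F, List.foldl_append, List.foldl_cons, List.foldl_nil, List.length_append,
      List.length_cons, List.length_nil]
    simp only [F] at hw
    calc w.foldl (fun a b => a * 4 + b) 0 * 4 + b < 4 ^ w.length * 4 := by omega
    _ ≤ 4 ^ (w.length + (0 + 1)) := by ring_nf; omega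

theorem win_zero (cs : List Char) (i : Nat) : win cs i 0 = [] := by simp [win]

theorem win_succ (cs : List Char) (i j : Nat) (h : i + j < cs.length) :
    win cs i (j + 1) = win cs i j ++ [nuc cs[i + j]] := by
  simp only [win]
  rw [List.take_add_one]
  have hg : (cs.drop i)[j]? = some cs[i + j] := by
    rw [List.getElem?_drop]
    exact List.getElem?_eq_getElem (by omega)
  simp [hg]

theorem length_win (cs : List Char) (i k : Nat) (h : i + k ≤ cs.length) :
    (win cs i k).length = k := by
  simp [win]; omega

theorem mem_win (cs : List Char) (p k q : Nat) (hq : q < cs.length) (h1 : p ≤ q)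
    (h2 : q < p + k) : nuc cs[q] ∈ win cs p k := by
  simp only [win, List.mem_map]
  refine ⟨cs[q], ?_, rfl⟩
  have hlen : q - p < ((cs.drop p).take k).length := by simp; omega
  have he : ((cs.drop p).take k)[q - p]'hlen = cs[q] := by
    rw [List.getElem_take, List.getElem_drop]
    congr 1; omega
  exact he ▸ List.getElem_mem hlen

theorem win_tail (cs : List Char) (i k : Nat) :
    win cs (i + 1) k = (win cs i (k + 1)).tail := by
  simp only [win]
  rw [← List.map_tail, ← List.drop_one, List.drop_take, ← List.drop_drop]
  congr 1

theorem mod_step (x b j : Nat) (hb : b < 4) :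
    (b + x * 4) % 4 ^ (j + 1) = (x % 4 ^ j) * 4 + b := by
  have h4 : 4 ^ (j + 1) = 4 ^ j * 4 := pow_succ 4 j
  have hlt : (x % 4 ^ j) * 4 + b < 4 ^ j * 4 := by
    have := Nat.mod_lt x (show 0 < 4 ^ j from pow_pos (by norm_num) j)
    omega
  have hmq : b + x * 4 ≡ b + (x % 4 ^ j) * 4 [MOD 4 ^ j * 4] :=
    Nat.ModEq.add_left b ((Nat.mod_modEq x (4 ^ j)).symm.mul_right' 4)
  calc (b + x * 4) % 4 ^ (j + 1)
      = (b + (x % 4 ^ j) * 4) % (4 ^ j * 4) := by rw [h4]; exact hmq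
    _ = (x % 4 ^ j) * 4 + b := by rw [Nat.mod_eq_of_lt (by omega)]; omega

-- ----- the inner loop satisfies its spec -----
theorem inner_spec (cs : List Char) (kN sN : Nat) (hs : sN = 2 * (kN - 1)) :
    ∀ fuel iN jN x xb, cs.length + 1 - (iN + jN) ≤ fuel →
    AInv cs kN iN jN x xb →
    ∃ (iN' jN' x' xb' : Nat),
      kmersInner cs kN sN iN jN x xb = ((iN' : Int), (jN' : Int), x', xb') ∧
      AInv cs kN iN' jN' x' xb' ∧ iN ≤ iN' ∧
      (jN' = kN ∨ (iN' + jN' = cs.length ∧ jN' < kN)) ∧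
      (∀ p, iN ≤ p → p < iN' → p + kN ≤ cs.length → 4 ∈ win cs p kN) := by
  intro fuel
  induction fuel with
  | zero =>
    intro iN jN x xb hf hinv
    exact absurd hinv.2.1 (by omega)
  | succ fuel ih =>
    intro iN jN x xb hf hinv
    obtain ⟨h1, h2, h3, h4, h5, h6⟩ := hinv
    rw [kmersInner]
    by_cases hg : iN + jN < cs.length ∧ jN < kN
    · rw [dif_pos (by push_cast; omega)]
      have hidx : (PySem.List.pyGet? cs ((iN : Int) + (jN : Int))).getD 'N' = cs[iN + jN]'hg.1 := by
        have hc : ((iN : Int) + (jN : Int)) = ((iN + jN : Nat) : Int) := by push_cast; ring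
        rw [hc, PySem.List.pyGet?_natCast, List.getElem?_eq_getElem hg.1, Option.getD_some]
      by_cases hb : nuc (cs[iN + jN]'hg.1) = 4
      · simp only [hidx, hb, if_pos]
        obtain ⟨iN', jN', x', xb', heq, hinv', hle, hexit, hskip⟩ :=
          ih (iN + jN + 1) 0 0 0 (by omega)
            ⟨Nat.zero_le _, by omega, by simp [win_zero], by simp [win_zero, F],
              pow_pos (by norm_num) kN, by simp [win_zero, RC]⟩
        refine ⟨iN', jN', x', xb', by exact_mod_cast heq, hinv', by omega, hexit, ?_⟩
        intro p hp1 hp2 hp3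
        by_cases hpc : p < iN + jN + 1
        · have hm : nuc cs[iN + jN] ∈ win cs p kN :=
            mem_win cs p kN (iN + jN) hg.1 (by omega) (by omega)
          rwa [hb] at hm
        · exact hskip p (by omega) hp2 hp3
      · simp only [hidx, hb, if_neg, if_false]
        have hb4 : nuc (cs[iN + jN]'hg.1) < 4 := lt_of_le_of_ne (nuc_le _) hb
        set b := nuc (cs[iN + jN]'hg.1) with hbdef
        have hkpos : 1 ≤ kN := by omega
        -- the two register updates, as arithmetic
        have hxval : x <<< 2 ||| b = b + x * 4 := by
          rw [Nat.lor_comm]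
          have := lor_disjoint 2 b x hb4
          simpa [Nat.shiftLeft_eq] using this
        have hpow : (2 : Nat) ^ sN = 4 ^ (kN - 1) := by
          rw [hs, show (4 : Nat) = 2 ^ 2 by norm_num, ← pow_mul]
        have hxbdiv : xb >>> 2 = xb / 4 := by
          rw [Nat.shiftRight_eq_div_pow]
        have hxblt : xb / 4 < 4 ^ (kN - 1) := by
          apply Nat.div_lt_of_lt_mul
          have : 4 ^ kN = 4 ^ (kN - 1) * 4 := by
            rw [← pow_succ]; congr 1; omega
          omega
        have hxbval : xb >>> 2 ||| (3 - b) <<< sN = xb / 4 + (3 - b) * 4 ^ (kN - 1) := by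
          rw [hxbdiv, lor_disjoint sN (xb / 4) (3 - b) (by rw [hpow]; exact hxblt), hpow]
        -- window bookkeeping
        have hwin : win cs iN (jN + 1) = win cs iN jN ++ [b] := win_succ cs iN jN hg.1
        have hwlen : (win cs iN jN).length = jN := length_win cs iN jN (by omega)
        have hinv2 : AInv cs kN iN (jN + 1) (x <<< 2 ||| b) (xb >>> 2 ||| (3 - b) <<< sN) := by
          refine ⟨by omega, by omega, ?_, ?_, ?_, ?_⟩
          · rw [hwin]; simp [h3]; omega
          · rw [hxval, mod_step x b jN hb4, h4, hwin, F_append]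
          · rw [hxbval]
            have h4k : 4 ^ kN = 4 ^ (kN - 1) * 4 := by rw [← pow_succ]; congr 1; omega
            calc xb / 4 + (3 - b) * 4 ^ (kN - 1)
                ≤ xb / 4 + 3 * 4 ^ (kN - 1) :=
                  Nat.add_le_add_left (Nat.mul_le_mul_right _ (by omega)) _
              _ < 4 ^ kN := by omega
          · rw [hxbval, hwin, RC_append, hwlen]
            have hsplit : 4 ^ (kN - 1) = 4 ^ jN * 4 ^ (kN - 1 - jN) := by
              rw [← pow_add]; congr 1; omega
            have hstep : xb / 4 + (3 - b) * 4 ^ (kN - 1)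
                = xb / 4 + (3 - b) * 4 ^ jN * 4 ^ (kN - 1 - jN) := by rw [hsplit]; ring
            rw [hstep, show kN - (jN + 1) = kN - 1 - jN by omega,
              Nat.add_mul_div_right _ _ (pow_pos (by norm_num) _),
              Nat.div_div_eq_div_mul,
              show (4 : Nat) * 4 ^ (kN - 1 - jN) = 4 ^ (kN - jN) by
                rw [← pow_succ']; congr 1; omega,
              h6]
        obtain ⟨iN', jN', x', xb', heq, hinv', hle, hexit, hskip⟩ :=
          ih iN (jN + 1) _ _ (by omega) hinv2
        exact ⟨iN', jN', x', xb', by exact_mod_cast heq, hinv', hle, hexit, hskip⟩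
    · rw [dif_neg (by push_cast; omega)]
      exact ⟨iN, jN, x, xb, rfl, ⟨h1, h2, h3, h4, h5, h6⟩, le_refl _, by omega, by omega⟩

theorem refFrom_stop (cs : List Char) (kN : Nat) (bS : Bool) (i : Nat) (h : cs.length < i + kN) :
    refFrom cs kN bS i = [] := by
  rw [refFrom]; simp; omega

theorem refFrom_skip (cs : List Char) (kN : Nat) (bS : Bool) :
    ∀ d i, (∀ p, i ≤ p → p < i + d → p + kN ≤ cs.length → 4 ∈ win cs p kN) →
    refFrom cs kN bS i = refFrom cs kN bS (i + d) := by
  intro d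
  induction d with
  | zero => intro i _; rfl
  | succ d ihd =>
    intro i hp
    have h1 : refFrom cs kN bS i = refFrom cs kN bS (i + 1) := by
      by_cases hg : i + kN ≤ cs.length
      · rw [refFrom, dif_pos hg, if_pos (hp i le_rfl (by omega) hg)]
        simp
      · rw [refFrom_stop cs kN bS i (by omega), refFrom_stop cs kN bS (i + 1) (by omega)]
    rw [h1, ihd (i + 1) (fun p a b c => hp p (by omega) (by omega) c)]
    congr 1
    omega

theorem F_lin (w : List Nat) : ∀ a : Nat,
    w.foldl (fun a b => a * 4 + b) a = a * 4 ^ w.length + F w := by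
  induction w with
  | nil => simp [F]
  | cons b w ih =>
    intro a
    simp only [List.foldl_cons, List.length_cons, F]
    rw [ih (a * 4 + b), ih (0 * 4 + b)]
    simp [pow_succ]; ring

theorem F_cons (d : Nat) (t : List Nat) : F (d :: t) = d * 4 ^ t.length + F t := by
  simp only [F, List.foldl_cons]
  rw [F_lin]
  simp [F]

-- when the outer guard fails the outer loop returns acc (whatever the fuel)
theorem outer_stop (cs : List Char) (kN sN msk : Nat) (bS : Bool)
    (fuel : Nat) (i j : Int) (x xb : Nat) (acc : List Int)
    (h : ¬ (i + (kN : Int) ≤ (cs.length : Int))) :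
    kmersOuter cs kN sN msk bS fuel i j x xb acc = acc := by
  cases fuel with
  | zero => rfl
  | succ fuel => rw [kmersOuter, if_neg h]

-- ----- the outer loop produces refFrom -----
theorem outer_spec (cs : List Char) (kN sN msk : Nat) (bS : Bool)
    (hk : 1 ≤ kN) (hmsk : msk = 4 ^ kN - 1) (hs : sN = 2 * (kN - 1)) :
    ∀ fuel iN jN x xb acc, cs.length + 1 - iN ≤ fuel →
    AInv cs kN iN jN x xb →
    kmersOuter cs kN sN msk bS fuel (iN : Int) (jN : Int) x xb acc
      = acc ++ refFrom cs kN bS iN := by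
  intro fuel
  induction fuel with
  | zero =>
    intro iN jN x xb acc hf hinv
    exact absurd hinv.2.1 (by omega)
  | succ fuel ih =>
    intro iN jN x xb acc hf hinv
    rw [kmersOuter]
    by_cases hguard : iN + kN ≤ cs.length
    · rw [if_pos (by push_cast; omega)]
      obtain ⟨iN', jN', x', xb', heq, hinv', hle, hexit, hskip⟩ :=
        inner_spec cs kN sN hs (cs.length + 1) iN jN x xb (by omega) hinv
      rw [heq]
      dsimp only
      have hskip' : refFrom cs kN bS iN = refFrom cs kN bS iN' := by
        have := refFrom_skip cs kN bS (iN' - iN) iN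
          (fun p a b c => hskip p a (by omega) c)
        rwa [show iN + (iN' - iN) = iN' by omega] at this
      obtain ⟨hj1, hj2, hj3, hj4, hj5, hj6⟩ := hinv'
      by_cases hj : jN' = kN
      · rw [if_pos (by exact_mod_cast hj)]
        subst hj
        -- the yielded values
        have hwne : (win cs iN' jN').length = jN' := length_win cs iN' jN' hj2
        have hxmask : x' &&& msk = F (win cs iN' jN') := by
          rw [hmsk, show (4 : Nat) ^ jN' = 2 ^ (2 * jN') by
            rw [show (4 : Nat) = 2 ^ 2 by norm_num, ← pow_mul],
            Nat.and_two_pow_sub_one_eq_mod,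
            show (2 : Nat) ^ (2 * jN') = 4 ^ jN' by
              rw [show (4 : Nat) = 2 ^ 2 by norm_num, ← pow_mul], hj4]
        have hxbval : xb' = RC (win cs iN' jN') := by
          have := hj6
          rwa [Nat.sub_self, pow_zero, Nat.div_one] at this
        -- the next state's invariant
        cases hw : win cs iN' jN' with
        | nil => exfalso; rw [hw] at hwne; simp at hwne; omega
        | cons d t =>
        have htlen : t.length = jN' - 1 := by
          have := hw ▸ hwne; simp at this; omega
        have ht : win cs (iN' + 1) (jN' - 1) = t := by
          rw [show jN' - 1 = (jN' - 1 + 1) - 1 by omega]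
          rw [show (jN' - 1 + 1) - 1 = ((jN' - 1) + 1) - 1 by omega]
          have := win_tail cs iN' (jN' - 1)
          rw [show jN' - 1 + 1 = jN' by omega] at this
          rw [show ((jN' - 1) + 1) - 1 = jN' - 1 by omega, this, hw]
          rfl
        have hvalid : ∀ e ∈ win cs iN' jN', e < 4 := by
          intro e he
          have he' := he
          simp only [win, List.mem_map] at he'
          obtain ⟨c, _, rfl⟩ := he'
          have h4c : nuc c ≤ 4 := nuc_le c
          have : nuc c ≠ 4 := fun h => hj3 (h ▸ he)
          omega
        have hFt : F t < 4 ^ t.length :=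
          F_lt t (fun e he => hvalid e (hw ▸ List.mem_cons_of_mem d he))
        have hmodF : F (win cs iN' jN') % 4 ^ (jN' - 1) = F t := by
          rw [hw, F_cons, htlen, Nat.mul_comm, Nat.mul_add_mod,
            Nat.mod_eq_of_lt (htlen ▸ hFt)]
        have hdivRC : RC (win cs iN' jN') / 4 ^ (jN' - (jN' - 1)) = RC t := by
          rw [show jN' - (jN' - 1) = 1 by omega, pow_one, hw, RC_cons]
          have hd : d < 4 := hvalid d (hw ▸ List.mem_cons_self)
          omega
        have hinv2 : AInv cs jN' (iN' + 1) (jN' - 1) (x' &&& msk) xb' := by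
          refine ⟨by omega, by omega, ?_, ?_, ?_, ?_⟩
          · rw [ht]
            intro hmem
            exact absurd (hvalid 4 (hw ▸ List.mem_cons_of_mem d hmem)) (by omega)
          · rw [ht, hxmask, hmodF]
          · exact hj5
          · rw [ht, hxbval, hdivRC]
        -- assemble
        rw [hskip', refFrom, dif_pos hj2, if_neg hj3]
        have hrec := ih (iN' + 1) (jN' - 1) (x' &&& msk) xb'
          (acc ++ [((x' &&& msk : Nat) : Int)] ++ (if bS then [((xb' : Nat) : Int)] else []))
          (by omega) hinv2
        rw [show ((jN' : Int) - 1) = ((jN' - 1 : Nat) : Int) by omega,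
          show ((iN' : Int) + 1) = ((iN' + 1 : Nat) : Int) by omega, hrec,
          hxmask, hxbval]
        simp [List.append_assoc]
      · rw [if_neg (by exact_mod_cast hj)]
        have hx : iN' + jN' = cs.length ∧ jN' < kN := hexit.resolve_left hj
        rw [outer_stop cs kN sN msk bS fuel _ _ _ _ _ (by push_cast; omega)]
        rw [hskip', refFrom_stop cs kN bS iN' (by omega)]
        simp
    · rw [if_neg (by push_cast; omega)]
      rw [refFrom_stop cs kN bS iN (by omega)]
      simp

-- ----- k = 0 (nucleotide-free sequence): A cycles through j = -1 yielding zeros -----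
theorem k0_outer (cs : List Char) (sN msk : Nat) (bS : Bool)
    (hinv : ∀ c ∈ cs, nuc c = 4) :
    ∀ fuel i, 1 ≤ i → i ≤ cs.length + 1 → cs.length + 2 - i ≤ fuel →
    ∀ acc, kmersOuter cs 0 sN msk bS fuel (i : Int) (-1) 0 0 acc
      = acc ++ refFrom cs 0 bS i := by
  intro fuel
  induction fuel with
  | zero => intro i h1 h2 hf acc; omega
  | succ fuel ih =>
    intro i h1 h2 hf acc
    rw [kmersOuter]
    by_cases hg : i ≤ cs.length
    · rw [if_pos (by push_cast; omega)]
      have hin : kmersInner cs 0 sN (i : Int) (-1) 0 0 = ((i : Int), 0, 0, 0) := by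
        rw [kmersInner, dif_pos (by constructor <;> [push_cast; skip] <;> omega)]
        have hidx : ((i : Int) + -1) = ((i - 1 : Nat) : Int) := by push_cast; omega
        have hig : i - 1 < cs.length := by omega
        have hnc : nuc ((PySem.List.pyGet? cs ((i : Int) + -1)).getD 'N') = 4 := by
          rw [hidx, PySem.List.pyGet?_natCast, List.getElem?_eq_getElem hig, Option.getD_some]
          exact hinv _ (List.getElem_mem hig)
        simp only [hnc, if_pos]
        rw [kmersInner, dif_neg (by push_cast; intro hcon; exact hcon.2)]
        congr 1
        push_cast; omega
      rw [hin]
      dsimp only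
      rw [if_pos (by norm_num)]
      have hih := ih (i + 1) (by omega) (by omega) (by omega)
        (acc ++ [((0 &&& msk : Nat) : Int)] ++ (if bS then [((0 : Nat) : Int)] else []))
      simp only [Nat.zero_and] at hih ⊢
      rw [show ((i : Int) + 1) = ((i + 1 : Nat) : Int) by push_cast; ring,
        show ((0 : Int) - 1) = (-1 : Int) by ring, hih]
      have href : refFrom cs 0 bS i
          = ([(0 : Int)] ++ (if bS then [(0 : Int)] else [])) ++ refFrom cs 0 bS (i + 1) := by
        rw [refFrom, dif_pos (show i + 0 ≤ cs.length by omega),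
          if_neg (show ¬ ((4 : Nat) ∈ win cs i 0) by simp [win_zero])]
        simp [win_zero, F, RC]
      rw [href]
      simp [List.append_assoc]
    · rw [if_neg (by push_cast; omega), refFrom_stop cs 0 bS i (by omega)]
      simp

-- casts between B's Int folds and the Nat encodings
theorem F_cast (w : List Nat) : ∀ a : Nat,
    (w.map (fun n : Nat => (n : Int))).foldl (fun a b => a * 4 + b) (a : Int)
      = ((w.foldl (fun a b => a * 4 + b) a : Nat) : Int) := by
  induction w with
  | nil => intro a; simp
  | cons b w ih =>
    intro a
    simp only [List.map_cons, List.foldl_cons]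
    rw [show ((a : Int) * 4 + (b : Int)) = ((a * 4 + b : Nat) : Int) by push_cast; ring, ih]

theorem RC_cast (w : List Nat) : ∀ a : Nat, (∀ b ∈ w, b ≤ 3) →
    (w.map (fun n : Nat => (n : Int))).foldl (fun a b => a * 4 + (3 - b)) (a : Int)
      = ((w.foldl (fun a b => a * 4 + (3 - b)) a : Nat) : Int) := by
  induction w with
  | nil => intro a _; simp
  | cons b w ih =>
    intro a hb
    simp only [List.map_cons, List.foldl_cons]
    rw [show ((a : Int) * 4 + (3 - (b : Int))) = ((a * 4 + (3 - b) : Nat) : Int) by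
      have := hb b (by simp); push_cast [this]; ring]
    exact ih _ (fun e he => hb e (by simp [he]))

-- ----- B produces refFrom -----
theorem alt_fold (k : Int) (cs : List Char) (bS : Bool) (hk : 0 ≤ k) :
    ∀ fuel (iN : Nat) (acc : List Int), cs.length + 1 - iN ≤ fuel →
    (PySem.List.pyRange (iN : Int) ((cs.length : Int) - k + 1) 1).foldl
      (fun acc i =>
        let bs := (PySem.List.slice cs (some i) (some (i + k))).map (fun c => (nuc c : Int))
        if (4 : Int) ∈ bs then acc
        else
          acc ++ [bs.foldl (fun a b => a * 4 + b) 0]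
            ++ (if bS then [bs.reverse.foldl (fun a b => a * 4 + (3 - b)) 0] else [])) acc
      = acc ++ refFrom cs k.toNat bS iN := by
  have hkc : ((k.toNat : Int)) = k := Int.toNat_of_nonneg hk
  intro fuel
  induction fuel with
  | zero =>
    intro iN acc hf
    rw [PySem.List.pyRange_one_eq_nil (by rw [← hkc]; omega), List.foldl_nil,
      refFrom_stop cs k.toNat bS iN (by omega)]
    simp
  | succ fuel ih =>
    intro iN acc hf
    by_cases hg : iN + k.toNat ≤ cs.length
    · rw [PySem.List.pyRange_one_cons (by rw [← hkc]; omega), List.foldl_cons]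
      have hslice := PySem.List.slice_natCast_add (xs := cs) (j := iN) (n := k.toNat)
      rw [hkc] at hslice
      have hbs : ((cs.drop iN).take k.toNat).map (fun c => (nuc c : Int))
          = (win cs iN k.toNat).map (fun n : Nat => (n : Int)) := by
        simp [win, List.map_map]; rfl
      have hrange : ((iN : Int) + 1) = ((iN + 1 : Nat) : Int) := by push_cast; ring
      simp only [hslice, hbs, hrange]
      by_cases hm : (4 : Nat) ∈ win cs iN k.toNat
      · rw [if_pos (by simpa using ⟨4, hm, rfl⟩)]
        have href : refFrom cs k.toNat bS iN = refFrom cs k.toNat bS (iN + 1) := by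
          rw [refFrom, dif_pos hg, if_pos hm]; simp
        rw [ih (iN + 1) acc (by omega), href]
      · rw [if_neg (by
          intro hmem
          obtain ⟨n, hn, hn4⟩ := List.mem_map.1 hmem
          have hn4' : n = 4 := by exact_mod_cast hn4
          exact hm (hn4' ▸ hn))]
        have href : refFrom cs k.toNat bS iN
            = ([(F (win cs iN k.toNat) : Int)]
                ++ (if bS then [(RC (win cs iN k.toNat) : Int)] else []))
              ++ refFrom cs k.toNat bS (iN + 1) := by
          rw [refFrom, dif_pos hg, if_neg hm]
        have hval3 : ∀ b ∈ (win cs iN k.toNat).reverse, b ≤ 3 := by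
          intro e he
          rw [List.mem_reverse] at he
          have he4 : e ≤ 4 := by
            have he' := he
            simp only [win, List.mem_map] at he'
            obtain ⟨c, _, rfl⟩ := he'
            exact nuc_le c
          have : e ≠ 4 := fun h => hm (h ▸ he)
          omega
        have hxF : ((win cs iN k.toNat).map (fun n : Nat => (n : Int))).foldl
            (fun a b => a * 4 + b) 0 = ((F (win cs iN k.toNat) : Nat) : Int) := by
          have := F_cast (win cs iN k.toNat) 0
          rwa [Nat.cast_zero] at this
        have hxRC : ((win cs iN k.toNat).map (fun n : Nat => (n : Int))).reverse.foldl
            (fun a b => a * 4 + (3 - b)) 0 = ((RC (win cs iN k.toNat) : Nat) : Int) := by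
          have := RC_cast ((win cs iN k.toNat).reverse) 0 hval3
          rw [Nat.cast_zero] at this
          rw [← List.map_reverse]
          exact this
        rw [ih (iN + 1) _ (by omega), href, hxF, hxRC]
        simp [List.append_assoc]
    · rw [PySem.List.pyRange_one_eq_nil (by rw [← hkc]; omega), List.foldl_nil,
      refFrom_stop cs k.toNat bS iN (by omega)]
      simp

theorem alt_eq_refFrom (k : Int) (seq : String) (bS : Bool) (hk : 0 ≤ k) :
    kmers_alt k seq bS = refFrom seq.toList k.toNat bS 0 := by
  have h := alt_fold k seq.toList bS hk (seq.toList.length + 1) 0 [] (by omega)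
  simpa [kmers_alt] using h

-- ===== VERDICT (by name: the statement is the Claim_ definition above) =====
theorem kmers_spec : Claim_equal_kmers := by
  intro k seq bS _ hpre
  show kmers k seq bS = kmers_alt k seq bS
  cases hpre with
  | inl hk1 =>
    have hk0 : 0 ≤ k := by omega
    rw [alt_eq_refFrom k seq bS hk0]
    show kmersOuter seq.toList k.toNat (2 * (k.toNat - 1)) ((1 <<< (2 * k.toNat)) - 1) bS
      (seq.toList.length + 2) 0 0 0 0 [] = refFrom seq.toList k.toNat bS 0
    have hmsk : ((1 : Nat) <<< (2 * k.toNat)) - 1 = 4 ^ k.toNat - 1 := by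
      rw [Nat.one_shiftLeft,
        show (4 : Nat) ^ k.toNat = 2 ^ (2 * k.toNat) by
          rw [show (4 : Nat) = 2 ^ 2 by norm_num, ← pow_mul]]
    have h := outer_spec seq.toList k.toNat (2 * (k.toNat - 1)) ((1 <<< (2 * k.toNat)) - 1) bS
      (by omega) hmsk rfl (seq.toList.length + 2) 0 0 0 0 [] (by omega)
      ⟨Nat.zero_le _, by omega, by simp [win_zero], by simp [win_zero, F],
        pow_pos (by norm_num) _, by simp [win_zero, RC]⟩
    simpa using h
  | inr hpair =>
    obtain ⟨hk0, hall⟩ := hpair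
    subst hk0
    rw [alt_eq_refFrom 0 seq bS le_rfl]
    have hallc : ∀ c ∈ seq.toList, nuc c = 4 := by
      intro c hc
      have := List.all_eq_true.1 hall c hc
      simpa using this
    show kmersOuter seq.toList 0 0 0 bS (seq.toList.length + 2) 0 0 0 0 []
      = refFrom seq.toList 0 bS 0
    rw [show seq.toList.length + 2 = (seq.toList.length + 1) + 1 from rfl, kmersOuter]
    rw [if_pos (by push_cast; omega)]
    have hin : kmersInner seq.toList 0 0 0 0 0 0 = (0, 0, 0, 0) := by
      rw [kmersInner, dif_neg (by push_cast; intro hcon; exact hcon.2)]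
    rw [hin]
    dsimp only
    rw [if_pos (by norm_num)]
    rw [show ((0 : Int) + 1) = ((1 : Nat) : Int) by norm_num,
      show ((0 : Int) - 1) = (-1 : Int) by ring]
    simp only [Nat.zero_and]
    rw [k0_outer seq.toList 0 0 bS hallc (seq.toList.length + 1) 1 (by omega) (by omega)
      (by omega)]
    have href : refFrom seq.toList 0 bS 0
        = ([(0 : Int)] ++ (if bS then [(0 : Int)] else [])) ++ refFrom seq.toList 0 bS 1 := by
      rw [refFrom, dif_pos (by omega),
        if_neg (show ¬ ((4 : Nat) ∈ win seq.toList 0 0) by simp [win_zero])]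
      simp [win_zero, F, RC]
    rw [href]
    simp
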